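-- pv_equiv track=rewrite | github.com/daniel-reich/turbo-robot | M3oq3s8T7Nz7piBvc_16.py | even_odd_string
-- ===== SOURCE A (Python) =====
-- def even_odd_string(txt):
--   evens = ''
--   odds = ''
--   mylist = []
--   for x in txt:
--       mylist.append(x)
--   for x in range(0, len(txt), 2):
--       evens = evens + mylist[x]
--   for x in range(1, len(txt), 2):
--       odds = odds + mylist[x]
--   return evens + " " + odds
-- ===== SOURCE B (Python) =====
-- def even_odd_string(txt):
--     evens = []
--     odds = []
--     for i, ch in enumerate(txt):
--         if i % 2 == 0:
--             evens.append(ch)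
--         else:
--             odds.append(ch)
--     return ''.join(evens) + ' ' + ''.join(odds)
-- ===== Notes on version B (the rewrite author's own statement) =====
-- stated objective: simpler
-- what changed: One enumerate pass carrying both accumulators (list append + join) replaces A's copy loop plus two separate ranged-index loops over that copy.
import Mathlib
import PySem

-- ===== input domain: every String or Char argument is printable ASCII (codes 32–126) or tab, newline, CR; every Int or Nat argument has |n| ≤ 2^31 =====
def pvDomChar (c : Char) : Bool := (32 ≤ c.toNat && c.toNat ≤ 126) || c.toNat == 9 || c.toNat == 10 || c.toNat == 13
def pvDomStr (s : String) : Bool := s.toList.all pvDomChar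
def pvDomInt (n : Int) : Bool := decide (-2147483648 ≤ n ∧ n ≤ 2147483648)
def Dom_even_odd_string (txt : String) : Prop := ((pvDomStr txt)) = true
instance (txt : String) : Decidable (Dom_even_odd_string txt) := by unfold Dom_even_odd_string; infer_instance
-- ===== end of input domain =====

-- B replaces A's copy loop plus two separate ranged-index loops by a single
-- enumerate pass carrying both accumulators (objective: simpler).


-- ===== PORT A =====
-- mylist[x] is always in range here, so pyGetD's default ' ' is never used.
def even_odd_string (txt : String) : String :=
  let mylist : List Char := txt.toList.foldl (fun acc x => acc ++ [x]) []
  let evens : String := (PySem.List.pyRange 0 (PySem.Str.len txt) 2).foldl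
      (fun s x => s.push (PySem.List.pyGetD mylist x ' ')) ""
  let odds : String := (PySem.List.pyRange 1 (PySem.Str.len txt) 2).foldl
      (fun s x => s.push (PySem.List.pyGetD mylist x ' ')) ""
  evens ++ " " ++ odds

-- ===== PORT B =====
def even_odd_string_alt (txt : String) : String :=
  let p := (PySem.List.enumerate txt.toList 0).foldl
      (fun (acc : List Char × List Char) ic =>
        if PySem.Int.mod ic.1 2 = 0 then (acc.1 ++ [ic.2], acc.2) else (acc.1, acc.2 ++ [ic.2]))
      ([], [])
  String.ofList p.1 ++ " " ++ String.ofList p.2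

-- ===== PRECONDITION & SPEC =====
def Spec_even_odd_string (txt : String) (out : String) : Prop := out = even_odd_string_alt txt
instance (txt : String) (out : String) : Decidable (Spec_even_odd_string txt out) := by unfold Spec_even_odd_string; infer_instance

-- ===== CLAIM (what is proved, stated in full; the proofs are below) =====
def Claim_equal_even_odd_string : Prop := ∀ (txt : String), Dom_even_odd_string txt → Spec_even_odd_string txt (even_odd_string txt)

-- ===== LEMMAS AND PROOFS =====

-- even-indexed and odd-indexed characters of a list
def pvEv : List Char → List Char
  | [] => []
  | [a] => [a]
  | a :: _ :: r => a :: pvEv r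

def pvOd : List Char → List Char
  | [] => []
  | [_] => []
  | _ :: b :: r => b :: pvOd r

theorem pv_push_eq (s : String) (c : Char) : s.push c = s ++ String.ofList [c] := by
  rcases s with ⟨l⟩
  rfl

theorem pv_ofList_cons (c : Char) (l : List Char) :
    String.ofList (c :: l) = String.ofList [c] ++ String.ofList l := by
  rw [← String.ofList_append]
  rfl

theorem pv_step_ev (a b : Char) (r : List Char) (acc : String) (k : Nat) :
    acc.push (PySem.List.pyGetD (a :: b :: r) ((2 * (k + 1) : Nat) : Int) ' ')
      = acc.push (PySem.List.pyGetD r ((2 * k : Nat) : Int) ' ') := by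
  congr 1
  rw [PySem.List.pyGetD_natCast, PySem.List.pyGetD_natCast]
  have h : 2 * (k + 1) = (2 * k) + 1 + 1 := by ring
  rw [h, List.getD_cons_succ, List.getD_cons_succ]

theorem pv_step_od (a b : Char) (r : List Char) (acc : String) (k : Nat) :
    acc.push (PySem.List.pyGetD (a :: b :: r) ((2 * (k + 1) + 1 : Nat) : Int) ' ')
      = acc.push (PySem.List.pyGetD r ((2 * k + 1 : Nat) : Int) ' ') := by
  congr 1
  rw [PySem.List.pyGetD_natCast, PySem.List.pyGetD_natCast]
  have h : 2 * (k + 1) + 1 = (2 * k + 1) + 1 + 1 := by ring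
  rw [h, List.getD_cons_succ, List.getD_cons_succ]

theorem pv_copy (l : List Char) : ∀ acc : List Char,
    l.foldl (fun a x => a ++ [x]) acc = acc ++ l := by
  induction l with
  | nil => simp
  | cons x xs ih => intro acc; simp [List.foldl_cons, ih]

theorem pv_ev_fold (l : List Char) : ∀ s : String,
    (List.range ((l.length + 1) / 2)).foldl
      (fun s k => s.push (PySem.List.pyGetD l ((2 * k : Nat) : Int) ' ')) s
      = s ++ String.ofList (pvEv l) := by
  induction l using pvEv.induct with
  | case1 =>
      intro s
      simp [pvEv]
  | case2 a =>
      intro s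
      have h0 : PySem.List.pyGetD [a] ((2 * 0 : Nat) : Int) ' ' = a := by
        rw [PySem.List.pyGetD_natCast]; rfl
      simp [pvEv, List.range_succ, pv_push_eq]
  | case3 a b r ih =>
      intro s
      have hlen : ((a :: b :: r).length + 1) / 2 = (r.length + 1) / 2 + 1 := by
        simp [List.length_cons]; omega
      rw [hlen, List.range_succ_eq_map, List.foldl_cons, List.foldl_map]
      have h0 : PySem.List.pyGetD (a :: b :: r) ((2 * 0 : Nat) : Int) ' ' = a := by
        rw [PySem.List.pyGetD_natCast]; rfl
      rw [h0]
      rw [PySem.List.foldl_congr_mem (List.range ((r.length + 1) / 2)) _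
        (fun s k => s.push (PySem.List.pyGetD r ((2 * k : Nat) : Int) ' '))
        (s.push a) (fun acc x _ => pv_step_ev a b r acc x), ih (s.push a)]
      rw [pv_push_eq, String.append_assoc, ← pv_ofList_cons]
      rfl

theorem pv_od_fold (l : List Char) : ∀ s : String,
    (List.range (l.length / 2)).foldl
      (fun s k => s.push (PySem.List.pyGetD l ((2 * k + 1 : Nat) : Int) ' ')) s
      = s ++ String.ofList (pvOd l) := by
  induction l using pvOd.induct with
  | case1 =>
      intro s
      simp [pvOd]
  | case2 a =>
      intro s
      simp [pvOd]
  | case3 a b r ih =>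
      intro s
      have hlen : (a :: b :: r).length / 2 = r.length / 2 + 1 := by
        simp [List.length_cons]; omega
      rw [hlen, List.range_succ_eq_map, List.foldl_cons, List.foldl_map]
      have h0 : PySem.List.pyGetD (a :: b :: r) ((2 * 0 + 1 : Nat) : Int) ' ' = b := by
        rw [PySem.List.pyGetD_natCast]; rfl
      rw [h0]
      rw [PySem.List.foldl_congr_mem (List.range (r.length / 2)) _
        (fun s k => s.push (PySem.List.pyGetD r ((2 * k + 1 : Nat) : Int) ' '))
        (s.push b) (fun acc x _ => pv_step_od a b r acc x), ih (s.push b)]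
      rw [pv_push_eq, String.append_assoc, ← pv_ofList_cons]
      rfl

theorem pv_alt_fold (l : List Char) : ∀ (i : Int), 0 ≤ i → PySem.Int.mod i 2 = 0 →
    ∀ e o : List Char,
    (PySem.List.enumerate l i).foldl
      (fun (acc : List Char × List Char) ic =>
        if PySem.Int.mod ic.1 2 = 0 then (acc.1 ++ [ic.2], acc.2) else (acc.1, acc.2 ++ [ic.2]))
      (e, o)
      = (e ++ pvEv l, o ++ pvOd l) := by
  induction l using pvEv.induct with
  | case1 =>
      intro i _ _ e o
      simp [PySem.List.enumerate, pvEv, pvOd]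
  | case2 a =>
      intro i _ hi e o
      rw [PySem.List.enumerate_cons, List.foldl_cons]
      rw [if_pos hi]
      simp [PySem.List.enumerate, pvEv, pvOd]
  | case3 a b r ih =>
      intro i hge hi e o
      have hi1 : PySem.Int.mod (i + 1) 2 ≠ 0 := by
        simp [PySem.Int.mod, Int.fmod_eq_emod] at hi ⊢
        omega
      have hi2 : PySem.Int.mod (i + 1 + 1) 2 = 0 := by
        simp [PySem.Int.mod, Int.fmod_eq_emod] at hi ⊢
        omega
      rw [PySem.List.enumerate_cons, PySem.List.enumerate_cons,
          List.foldl_cons, List.foldl_cons]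
      rw [if_pos hi]
      rw [if_neg hi1]
      rw [ih (i + 1 + 1) (by omega) hi2]
      simp [pvEv, pvOd]

theorem pv_range_even (n : Nat) :
    PySem.List.pyRange 0 (n : Int) 2
      = (List.range ((n + 1) / 2)).map (fun k : Nat => ((2 * k : Nat) : Int)) := by
  rw [PySem.List.pyRange_of_pos 0 (n : Int) (by norm_num)]
  have hc : (if (0 : Int) < (n : Int) then (((n : Int) - 0 + 2 - 1) / 2).toNat else 0)
      = (n + 1) / 2 := by
    split_ifs with h
    · omega
    · omega
  rw [hc]
  apply List.map_congr_left
  intro k _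
  push_cast
  ring

theorem pv_range_odd (n : Nat) :
    PySem.List.pyRange 1 (n : Int) 2
      = (List.range (n / 2)).map (fun k : Nat => ((2 * k + 1 : Nat) : Int)) := by
  rw [PySem.List.pyRange_of_pos 1 (n : Int) (by norm_num)]
  have hc : (if (1 : Int) < (n : Int) then (((n : Int) - 1 + 2 - 1) / 2).toNat else 0)
      = n / 2 := by
    split_ifs with h
    · omega
    · omega
  rw [hc]
  apply List.map_congr_left
  intro k _
  push_cast
  ring

-- ===== VERDICT (by name: the statement is the Claim_ definition above) =====
theorem even_odd_string_spec : Claim_equal_even_odd_string := by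
  intro txt _
  unfold Spec_even_odd_string even_odd_string even_odd_string_alt
  simp only []
  rw [pv_copy txt.toList []]
  simp only [List.nil_append]
  have hlen : PySem.Str.len txt = (txt.toList.length : Int) := by
    simp [PySem.Str.len]
  rw [hlen, pv_range_even, pv_range_odd, List.foldl_map, List.foldl_map]
  rw [pv_ev_fold txt.toList "", pv_od_fold txt.toList ""]
  rw [pv_alt_fold txt.toList 0 (by norm_num) (by decide)]
  simp
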